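-- pv_equiv track=rewrite | github.com/Domine29/demos-and-notes | w3d3-big-o/examples.py | example_1
-- ===== SOURCE A (Python) =====
-- def example_1(my_list):
--     total = 0
--     for x in my_list:
--         value = x ** 2
--         if value > 20:
--             for y in my_list:
--                 if y > 0:
--                     total += y + value
--     return total
-- ===== SOURCE B (Python) =====
-- def example_1(my_list):
--     positives = [y for y in my_list if y > 0]
--     pos_sum = sum(positives)
--     pos_cnt = len(positives)
--     return sum(pos_sum + pos_cnt * (x * x) for x in my_list if x * x > 20)
-- ===== Notes on version B (the rewrite author's own statement) =====
-- stated objective: faster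
-- what changed: Precompute the sum and count of positive elements once with a filter, then return one comprehension-sum of pos_sum + pos_cnt*x*x over x with x*x > 20, eliminating A's inner scan of the whole list.
import Mathlib
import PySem

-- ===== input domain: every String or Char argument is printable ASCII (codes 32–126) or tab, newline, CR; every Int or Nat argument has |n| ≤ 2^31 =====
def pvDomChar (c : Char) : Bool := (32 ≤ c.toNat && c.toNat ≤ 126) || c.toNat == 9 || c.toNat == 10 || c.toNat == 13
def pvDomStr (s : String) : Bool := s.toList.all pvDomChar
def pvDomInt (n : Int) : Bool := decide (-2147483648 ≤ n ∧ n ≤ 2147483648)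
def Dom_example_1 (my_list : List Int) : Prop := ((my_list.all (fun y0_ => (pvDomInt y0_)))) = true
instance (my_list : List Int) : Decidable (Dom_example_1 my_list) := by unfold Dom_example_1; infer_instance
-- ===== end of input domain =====

-- ===== PORT A =====
-- One line: B precomputes the sum/count of positives and sums a single comprehension over x (faster).
def example_1 (my_list : List Int) : Int :=
  my_list.foldl (fun total x =>
    let value := x ^ 2
    if value > 20 then
      my_list.foldl (fun t y => if y > 0 then t + (y + value) else t) total
    else total) 0

-- ===== PORT B =====
def example_1_alt (my_list : List Int) : Int :=
  let positives := my_list.filter (fun y => y > 0)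
  let pos_sum := positives.sum
  let pos_cnt : Int := positives.length
  (((my_list.filter (fun x => x * x > 20)).map (fun x => pos_sum + pos_cnt * (x * x))).sum)

-- ===== PRECONDITION & SPEC =====
def Spec_example_1 (my_list : List Int) (out : Int) : Prop := out = example_1_alt my_list
instance (my_list : List Int) (out : Int) : Decidable (Spec_example_1 my_list out) := by unfold Spec_example_1; infer_instance

-- ===== CLAIM (what is proved, stated in full; the proofs are below) =====
def Claim_equal_example_1 : Prop := ∀ (my_list : List Int), Dom_example_1 my_list → Spec_example_1 my_list (example_1 my_list)

-- ===== LEMMAS AND PROOFS =====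

-- A's inner loop computes t + pos_sum + pos_cnt * v
theorem inner_eq (l : List Int) (v t : Int) :
    l.foldl (fun t y => if y > 0 then t + (y + v) else t) t
      = t + (l.filter (fun y => y > 0)).sum
          + ((l.filter (fun y => y > 0)).length : Int) * v := by
  induction l generalizing t with
  | nil => simp
  | cons a l ih =>
    by_cases h : a > 0 <;>
      simp only [List.foldl, List.filter, h, decide_true, decide_false, if_true, if_false,
        List.sum_cons, List.length_cons] <;> rw [ih] <;> push_cast <;> ring

-- A's outer loop equals the sum of B's comprehension
theorem outer_eq (l m : List Int) (t : Int) :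
    l.foldl (fun total x =>
      let value := x ^ 2
      if value > 20 then
        m.foldl (fun t y => if y > 0 then t + (y + value) else t) total
      else total) t
    = t + (((l.filter (fun x => x * x > 20)).map
        (fun x => (m.filter (fun y => y > 0)).sum
          + ((m.filter (fun y => y > 0)).length : Int) * (x * x))).sum) := by
  induction l generalizing t with
  | nil => simp
  | cons a l ih =>
    have hsq : a ^ 2 = a * a := sq a
    by_cases h : a * a > 20 <;>
      simp only [List.foldl, List.filter, h, decide_true, decide_false, hsq, if_true, if_false,
        List.map_cons, List.sum_cons] <;> rw [ih]
    · rw [inner_eq]; ring_nf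

-- ===== VERDICT (by name: the statement is the Claim_ definition above) =====
theorem example_1_spec : Claim_equal_example_1 := by
  intro l _
  unfold Spec_example_1 example_1 example_1_alt
  rw [outer_eq]; ring
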